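-- pv_equiv track=rewrite | github.com/bigguscodus/python_course | hw7/task2.py | _grid_interpritator
-- ===== SOURCE A (Python) =====
-- def _grid_interpritator(string_with_grid: str):
--     temp_result = []
--     for index, value in enumerate(list(string_with_grid)):
--         if value == "#":
--             continue
--         try:
--             if string_with_grid[index + 1] == "#":
--                 continue
--             else:
--                 temp_result.append(value)
--         except IndexError:
--             temp_result.append(value)
--     return temp_result
-- ===== SOURCE B (Python) =====
-- def _grid_interpritator(string_with_grid: str):
--     # Split on '#': a kept char is any char of a segment except the last char
--     # of a non-final segment (that one is immediately followed by '#').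
--     parts = string_with_grid.split("#")
--     kept = "".join(p[:-1] for p in parts[:-1]) + parts[-1]
--     return list(kept)
-- ===== Notes on version B (the rewrite author's own statement) =====
-- stated objective: faster
-- what changed: Replaces the per-character index-lookahead loop with try/except IndexError by a split-based pipeline: split the string on the grid character into segments, keep every segment minus the last char of each non-final segment (that char is immediately followed by a grid character), join and listify.
import Mathlib
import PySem

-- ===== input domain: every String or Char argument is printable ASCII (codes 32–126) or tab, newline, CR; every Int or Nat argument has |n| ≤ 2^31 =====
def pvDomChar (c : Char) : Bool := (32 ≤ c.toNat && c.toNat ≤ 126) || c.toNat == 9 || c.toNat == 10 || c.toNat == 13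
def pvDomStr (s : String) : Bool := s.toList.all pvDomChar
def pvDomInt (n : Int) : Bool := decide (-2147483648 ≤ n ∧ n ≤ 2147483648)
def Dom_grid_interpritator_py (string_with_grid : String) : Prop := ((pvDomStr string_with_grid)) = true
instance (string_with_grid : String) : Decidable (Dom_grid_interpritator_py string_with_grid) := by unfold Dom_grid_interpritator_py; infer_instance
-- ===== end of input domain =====

-- B replaces A's per-character index-lookahead loop with try/except by a split-based pipeline
-- (C-level str.split/join replace the Python-level per-char loop; measured faster in a timing run).

-- ===== PORT A =====
-- for index, value in enumerate(list(s)): skip '#'; look at s[index+1] (IndexError -> append)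
def grid_interpritator_py (string_with_grid : String) : List String :=
  (PySem.List.enumerate string_with_grid.toList 0).foldl
    (fun acc iv =>
      if iv.2 = '#' then acc
      else
        match PySem.Str.pyGet? string_with_grid (iv.1 + 1) with
        | some c => if c = '#' then acc else acc ++ [String.ofList [iv.2]]
        | none => acc ++ [String.ofList [iv.2]])
    []

-- ===== PORT B =====
-- parts = s.split('#'); kept = ''.join(p[:-1] for p in parts[:-1]) + parts[-1]; return list(kept)
def grid_interpritator_py_alt (string_with_grid : String) : List String :=
  let parts := PySem.Chars.splitOn string_with_grid.toList ['#']
  let kept := PySem.Chars.join []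
      (parts.dropLast.map (fun p => PySem.List.slice p none (some (-1))))
    ++ PySem.List.pyGetD parts (-1) []
  kept.map (fun c => String.ofList [c])

-- ===== PRECONDITION & SPEC =====
def Spec_grid_interpritator_py (string_with_grid : String) (out : List String) : Prop := out = grid_interpritator_py_alt string_with_grid
instance (string_with_grid : String) (out : List String) : Decidable (Spec_grid_interpritator_py string_with_grid out) := by unfold Spec_grid_interpritator_py; infer_instance

-- ===== CLAIM (what is proved, stated in full; the proofs are below) =====
def Claim_equal_grid_interpritator_py : Prop := ∀ (string_with_grid : String), Dom_grid_interpritator_py string_with_grid → Spec_grid_interpritator_py string_with_grid (grid_interpritator_py string_with_grid)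

-- ===== LEMMAS AND PROOFS =====

-- canonical structural form of A: keep c iff c ≠ '#' and the next char (if any) ≠ '#'
def pvCore : List Char → List String
  | [] => []
  | c :: rest =>
    (if c = '#' then []
     else match rest.head? with
          | some d => if d = '#' then [] else [String.ofList [c]]
          | none => [String.ofList [c]]) ++ pvCore rest

-- structural form of split on '#'
def pvSplit : List Char → List (List Char)
  | [] => [[]]
  | c :: rest => if c = '#' then [] :: pvSplit rest else (pvSplit rest).modifyHead (c :: ·)

lemma pvSplit_cons (c : Char) (rest : List Char) :
    pvSplit (c :: rest) = if c = '#' then [] :: pvSplit rest else (pvSplit rest).modifyHead (c :: ·) := rfl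

lemma pvSplit_ne_nil (cs : List Char) : pvSplit cs ≠ [] := by
  cases cs with
  | nil => simp [pvSplit]
  | cons c rest =>
    simp only [pvSplit]
    split_ifs
    · simp
    · cases h : pvSplit rest with
      | nil => exact absurd h (pvSplit_ne_nil rest)
      | cons q qs => simp [List.modifyHead]

-- A's fold over the suffix `suf` starting at index `pre.length`, indexing into the full list
lemma pvA_fold (s : String) (pre suf : List Char) (acc : List String)
    (h : s.toList = pre ++ suf) :
    (PySem.List.enumerate suf (pre.length)).foldl
      (fun acc iv =>
        if iv.2 = '#' then acc
        else
          match PySem.Str.pyGet? s (iv.1 + 1) with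
          | some c => if c = '#' then acc else acc ++ [String.ofList [iv.2]]
          | none => acc ++ [String.ofList [iv.2]]) acc
      = acc ++ pvCore suf := by
  induction suf generalizing pre acc with
  | nil => simp [pvCore, PySem.List.enumerate_nil]
  | cons c rest ih =>
    rw [PySem.List.enumerate_cons, List.foldl_cons]
    have hget : PySem.Str.pyGet? s ((pre.length : Int) + 1) = rest.head? := by
      have : s.toList = (pre ++ [c]) ++ rest := by simpa using h
      have h2 : ((pre.length : Int) + 1) = (((pre ++ [c]).length : Nat) : Int) := by
        simp
      rw [PySem.Str.pyGet?_eq, this, h2]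
      have := PySem.List.pyGet?_append_right (pre := pre ++ [c]) (ys := rest) (k := 0)
      simpa [List.head?_eq_getElem?] using this
    have hshift : ((pre.length : Int) + 1) = (((pre ++ [c]).length : Nat) : Int) := by simp
    have ihc := ih (pre := pre ++ [c])
      (h := by simpa using h)
    by_cases hc : c = '#'
    · simp only [hc]
      rw [hshift] at *
      simpa [pvCore, hc] using ihc acc
    · simp only [if_neg hc, hget]
      cases hh : rest.head? with
      | none =>
        rw [hshift]
        rw [ihc (acc ++ [String.ofList [c]])]
        simp [pvCore, hc, hh]
      | some d =>
        by_cases hd : d = '#'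
        · simp only [if_pos hd]
          rw [hshift, ihc acc]
          simp [pvCore, hc, hh, hd]
        · simp only [if_neg hd]
          rw [hshift, ihc (acc ++ [String.ofList [c]])]
          simp [pvCore, hc, hh, hd]

lemma pvA_eq_core (s : String) : grid_interpritator_py s = pvCore s.toList := by
  have := pvA_fold s [] s.toList [] (by simp)
  simpa [grid_interpritator_py] using this

-- PySem's fueled splitOn.go, specialised to sep = ['#'] and enough fuel, is pvSplit
lemma pvGo_eq (fuel : Nat) (l cur : List Char) (acc : List (List Char))
    (hf : l.length < fuel) :
    PySem.Chars.splitOn.go ['#'] fuel l cur acc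
      = acc.reverse ++ (pvSplit l).modifyHead (cur.reverse ++ ·) := by
  induction fuel generalizing l cur acc with
  | zero => omega
  | succ fuel ih =>
    cases l with
    | nil => simp [PySem.Chars.splitOn.go, pvSplit, List.modifyHead]
    | cons c rest =>
      by_cases hc : c = '#'
      · have : (['#'] : List Char).isPrefixOf (c :: rest) = true := by simp [hc]
        rw [PySem.Chars.splitOn.go, if_pos this]
        simp only [List.length_singleton, List.drop_one, List.tail_cons]
        rw [ih rest [] (cur.reverse :: acc) (by simpa using Nat.lt_of_succ_lt_succ hf)]
        rw [pvSplit_cons, if_pos hc]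
        cases pvSplit rest <;> simp [List.modifyHead]
      · have : (['#'] : List Char).isPrefixOf (c :: rest) = false := by
          simp [List.isPrefixOf]; exact fun h => hc h.symm
        rw [PySem.Chars.splitOn.go, if_neg (by simp [this])]
        rw [ih rest (c :: cur) acc (by simpa using Nat.lt_of_succ_lt_succ hf)]
        rw [pvSplit_cons, if_neg hc]
        cases hq : pvSplit rest with
        | nil => exact absurd hq (pvSplit_ne_nil rest)
        | cons q qs => simp [List.modifyHead]

lemma pvSplitOn_eq (cs : List Char) : PySem.Chars.splitOn cs ['#'] = pvSplit cs := by
  have h := pvGo_eq (cs.length + 1) cs [] [] (by omega)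
  have h2 : List.modifyHead (fun x : List Char => [].reverse ++ x) (pvSplit cs) = pvSplit cs := by
    cases pvSplit cs <;> simp [List.modifyHead]
  rw [h2] at h
  simpa [PySem.Chars.splitOn] using h

-- the chars B keeps, in structural form
def pvKeep : List Char → List Char
  | [] => []
  | [c] => if c = '#' then [] else [c]
  | c :: d :: rest => (if c = '#' ∨ d = '#' then [] else [c]) ++ pvKeep (d :: rest)

lemma pvJoin_flatten (ps : List (List Char)) : PySem.Chars.join [] ps = ps.flatten := by
  simp only [PySem.Chars.join, List.intercalate]
  induction ps with
  | nil => simp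
  | cons p ps ih =>
    cases ps with
    | nil => simp
    | cons q qs => simp_all [List.intersperse]

-- what B assembles from pvSplit equals pvKeep
lemma pvKept_eq (cs : List Char) :
    ((pvSplit cs).dropLast.map List.dropLast).flatten ++ (pvSplit cs).getLastD []
      = pvKeep cs := by
  induction cs with
  | nil => simp [pvSplit, pvKeep]
  | cons c rest ih =>
    cases rest with
    | nil =>
      by_cases hc : c = '#' <;> simp [pvSplit, pvKeep, hc, List.modifyHead]
    | cons d rest' =>
      have hne := pvSplit_ne_nil (d :: rest')
      rw [pvSplit_cons]
      by_cases hc : c = '#'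
      · rw [if_pos hc]
        cases hq : pvSplit (d :: rest') with
        | nil => exact absurd hq hne
        | cons q qs =>
          rw [hq] at ih
          cases qs <;> simp_all [pvKeep]
      · rw [if_neg hc]
        cases hq : pvSplit (d :: rest') with
        | nil => exact absurd hq hne
        | cons q qs =>
          rw [hq] at ih
          by_cases hd : d = '#'
          · have hEq : ([] : List Char) :: pvSplit rest' = q :: qs := by
              rw [← hq, pvSplit_cons, if_pos hd]
            have hq0 : q = [] := ((List.cons.injEq ..).mp hEq).1.symm
            have hqs : qs = pvSplit rest' := ((List.cons.injEq ..).mp hEq).2.symm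
            subst hq0
            cases hqs2 : qs with
            | nil => exact absurd (hqs2 ▸ hqs).symm (pvSplit_ne_nil rest')
            | cons r rs =>
              rw [hqs2] at ih
              have h2 : pvKeep (c :: d :: rest')
                  = (if c = '#' ∨ d = '#' then [] else [c]) ++ pvKeep (d :: rest') := rfl
              rw [h2, if_pos (Or.inr hd), List.nil_append, ← ih]
              simp [List.modifyHead, List.getLast?_cons_cons]
          · obtain ⟨q', hq'⟩ : ∃ q', q = d :: q' := by
              cases hr : pvSplit rest' with
              | nil => exact absurd hr (pvSplit_ne_nil rest')
              | cons r rs =>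
                have : pvSplit (d :: rest') = (d :: r) :: rs := by
                  rw [pvSplit_cons, if_neg hd, hr]; rfl
                rw [hq] at this
                exact ⟨r, ((List.cons.injEq ..).mp this).1⟩
            subst hq'
            cases qs with
            | nil => simp_all [pvKeep, List.modifyHead]
            | cons r rs => simp_all [pvKeep, List.modifyHead]

-- A's structural form is the singleton-string image of pvKeep
lemma pvCore_eq_map (cs : List Char) :
    pvCore cs = (pvKeep cs).map (fun c => String.ofList [c]) := by
  induction cs with
  | nil => simp [pvCore, pvKeep]
  | cons c rest ih =>
    cases rest with
    | nil => by_cases hc : c = '#' <;> simp [pvCore, pvKeep, hc]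
    | cons d rest' =>
      have h1 : pvCore (c :: d :: rest')
          = (if c = '#' then [] else if d = '#' then [] else [String.ofList [c]])
            ++ pvCore (d :: rest') := rfl
      have h2 : pvKeep (c :: d :: rest')
          = (if c = '#' ∨ d = '#' then [] else [c]) ++ pvKeep (d :: rest') := rfl
      rw [h1, h2, List.map_append, ← ih]
      by_cases hc : c = '#' <;> by_cases hd : d = '#' <;> simp [hc, hd]

lemma pvB_eq (s : String) :
    grid_interpritator_py_alt s = (pvKeep s.toList).map (fun c => String.ofList [c]) := by
  show (PySem.Chars.join []
      ((PySem.Chars.splitOn s.toList ['#']).dropLast.map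
        (fun p => PySem.List.slice p none (some (-1))))
    ++ PySem.List.pyGetD (PySem.Chars.splitOn s.toList ['#']) (-1) []).map
      (fun c => String.ofList [c])
    = (pvKeep s.toList).map (fun c => String.ofList [c])
  have hne := pvSplit_ne_nil s.toList
  have hlast : PySem.List.pyGetD (pvSplit s.toList) (-1) ([] : List Char)
      = (pvSplit s.toList).getLastD [] := by
    rw [PySem.List.pyGetD_neg_one (pvSplit s.toList) [] hne]
    simp [List.getLastD_eq_getLast?, List.getLast?_eq_some_getLast hne]
  have hsl : (pvSplit s.toList).dropLast.map
      (fun p => PySem.List.slice p none (some (-1)))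
      = (pvSplit s.toList).dropLast.map List.dropLast := by
    apply List.map_congr_left
    intro p _
    exact PySem.List.slice_to_neg_one p
  rw [pvSplitOn_eq, hsl, pvJoin_flatten, hlast, pvKept_eq]

-- ===== VERDICT (by name: the statement is the Claim_ definition above) =====
theorem grid_interpritator_py_spec : Claim_equal_grid_interpritator_py := by
  intro s _
  unfold Spec_grid_interpritator_py
  rw [pvA_eq_core, pvCore_eq_map, pvB_eq]
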